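-- pv_equiv track=rewrite | github.com/pwmcclung/practProbs | vowels.py | get_the_vowels
-- ===== SOURCE A (Python) =====
-- def get_the_vowels(word):
--     count = 0
--     list_word = list(word)
--     vowels = list('aeiou')
--     list_word_comp = [x for x in list_word if x in vowels]
--     while len(list_word_comp) > 0:
--         first = list_word_comp.pop(0)
--         if first == vowels[0]:
--             count += 1
--             a = vowels.pop(0)
--             vowels.append(a)
--     return count
-- ===== SOURCE B (Python) =====
-- def get_the_vowels(word):
--     count = 0
--     pos = 0
--     while True:
--         j = word.find("aeiou"[count % 5], pos)
--         if j == -1: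
--             return count
--         count += 1
--         pos = j + 1
-- ===== Notes on version B (the rewrite author's own statement) =====
-- stated objective: faster
-- what changed: B drops A's vowel-filtered list, quadratic pop(0) queue and rotating vowels list, and instead jumps straight to each next cyclic target vowel with str.find from the previous match position, keeping only a count and a position.
import Mathlib
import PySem

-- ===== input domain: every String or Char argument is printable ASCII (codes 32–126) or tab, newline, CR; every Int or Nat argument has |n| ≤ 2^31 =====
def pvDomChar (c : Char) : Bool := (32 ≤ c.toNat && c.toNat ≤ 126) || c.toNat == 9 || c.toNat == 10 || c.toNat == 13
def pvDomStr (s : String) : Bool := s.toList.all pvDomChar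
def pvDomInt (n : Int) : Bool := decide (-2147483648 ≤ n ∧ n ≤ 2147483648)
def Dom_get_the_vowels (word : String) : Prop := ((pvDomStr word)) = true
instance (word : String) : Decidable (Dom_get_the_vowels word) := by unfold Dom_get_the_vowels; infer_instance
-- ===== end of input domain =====

-- B replaces A's vowel-filtered list, pop(0) queue and rotating vowels list by str.find
-- jumps to the next cyclic target vowel; equivalence of the return values is proved below.

-- ===== PORT A =====
-- the while loop of A: recursion over list_word_comp with state (count, vowels);
-- the '[]' vowels branch is unreachable (vowels is always a rotation of "aeiou")
def pvGoA : List Char → Nat → List Char → Nat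
  | [], count, _ => count
  | _ :: rest, count, [] => pvGoA rest count []
  | first :: rest, count, v :: vs =>
      if first = v then pvGoA rest (count + 1) (vs ++ [v]) else pvGoA rest count (v :: vs)

def get_the_vowels (word : String) : Int :=
  let list_word := word.toList
  let vowels := "aeiou".toList
  let list_word_comp := list_word.filter (fun x => vowels.contains x)
  (pvGoA list_word_comp 0 vowels : Nat)

-- ===== PORT B =====
-- "aeiou"[count % 5]
def pvCyc (count : Nat) : Char := "aeiou".toList.getD (count % 5) ' '

-- word.find(t, pos): hand port of str.find for a 1-char needle, searched from the
-- front of the remaining suffix (exact: returns the offset of the first occurrence, none = -1)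
def pvFind (t : Char) : List Char → Option Nat
  | [] => none
  | x :: xs => if x = t then some 0 else (pvFind t xs).map (· + 1)

-- the while loop of B: the absolute position pos is carried as the remaining suffix
-- word[pos:]; 'pos = j + 1' becomes dropping k + 1 characters of the suffix
def pvGoB (cs : List Char) (count : Nat) : Nat :=
  match h : pvFind (pvCyc count) cs with
  | none => count
  | some k => pvGoB (cs.drop (k + 1)) (count + 1)
termination_by cs.length
decreasing_by
  cases cs with
  | nil => simp [pvFind] at h
  | cons x xs => simp [List.length_drop]

def get_the_vowels_alt (word : String) : Int :=
  (pvGoB word.toList 0 : Nat)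

-- ===== PRECONDITION & SPEC =====
def Spec_get_the_vowels (word : String) (out : Int) : Prop := out = get_the_vowels_alt word
instance (word : String) (out : Int) : Decidable (Spec_get_the_vowels word out) := by unfold Spec_get_the_vowels; infer_instance

-- ===== CLAIM (what is proved, stated in full; the proofs are below) =====
def Claim_equal_get_the_vowels : Prop := ∀ (word : String), Dom_get_the_vowels word → Spec_get_the_vowels word (get_the_vowels word)

-- ===== LEMMAS AND PROOFS =====

-- reference single pass: count the cyclic matches directly
def pvF : List Char → Nat → Nat
  | [], c => c
  | x :: xs, c => if x = pvCyc c then pvF xs (c + 1) else pvF xs c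

def pvRot (c : Nat) : List Char :=
  "aeiou".toList.drop (c % 5) ++ "aeiou".toList.take (c % 5)

theorem pvRot_head (c : Nat) : pvRot c = pvCyc c :: (pvRot c).tail := by
  have h : c % 5 = 0 ∨ c % 5 = 1 ∨ c % 5 = 2 ∨ c % 5 = 3 ∨ c % 5 = 4 := by omega
  rcases h with h | h | h | h | h <;> simp [pvRot, pvCyc, h]

theorem pvRot_step (c : Nat) : (pvRot c).tail ++ [pvCyc c] = pvRot (c + 1) := by
  have h : c % 5 = 0 ∨ c % 5 = 1 ∨ c % 5 = 2 ∨ c % 5 = 3 ∨ c % 5 = 4 := by omega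
  rcases h with h | h | h | h | h <;>
    · have h' : (c + 1) % 5 = (c % 5 + 1) % 5 := by omega
      simp [pvRot, pvCyc, h, h']

theorem pvCyc_vowel (c : Nat) : "aeiou".toList.contains (pvCyc c) = true := by
  have h : c % 5 = 0 ∨ c % 5 = 1 ∨ c % 5 = 2 ∨ c % 5 = 3 ∨ c % 5 = 4 := by omega
  rcases h with h | h | h | h | h <;> simp [pvCyc, h]

-- A's loop on the filtered word, with vowels = the rotation by c, computes pvF
theorem pvGoA_eq_F (s : List Char) : ∀ c,
    pvGoA (s.filter (fun x => "aeiou".toList.contains x)) c (pvRot c) = pvF s c := by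
  induction s with
  | nil => intro c; simp [pvF]; rw [pvRot_head c]; rfl
  | cons x xs ih =>
    intro c
    by_cases hv : "aeiou".toList.contains x = true
    · rw [List.filter_cons_of_pos hv]
      rw [pvRot_head c]
      by_cases hx : x = pvCyc c
      · simp only [pvGoA, pvRot_step c, pvF, hx]
        exact ih (c + 1)
      · simp only [pvGoA, ← pvRot_head c, pvF, if_neg hx]
        exact ih c
    · rw [List.filter_cons_of_neg hv]
      have hx : x ≠ pvCyc c := by
        intro he; rw [he] at hv; exact hv (pvCyc_vowel c)
      simp only [pvF, if_neg hx]
      exact ih c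

-- pvFind characterisation
theorem pvFind_none {t : Char} : ∀ {cs : List Char}, pvFind t cs = none → ∀ x ∈ cs, x ≠ t := by
  intro cs
  induction cs with
  | nil => intro _ x hx; cases hx
  | cons y ys ih =>
    intro h x hx
    by_cases hy : y = t
    · simp [pvFind, hy] at h
    · simp only [pvFind, if_neg hy, Option.map_eq_none_iff] at h
      rw [List.mem_cons] at hx
      rcases hx with rfl | hx
      · exact hy
      · exact ih h x hx

theorem pvFind_some {t : Char} : ∀ {cs : List Char} {k : Nat}, pvFind t cs = some k →
    (∀ x ∈ cs.take k, x ≠ t) ∧ cs.drop k = t :: cs.drop (k + 1) := by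
  intro cs
  induction cs with
  | nil => intro k h; simp [pvFind] at h
  | cons y ys ih =>
    intro k h
    by_cases hy : y = t
    · simp only [pvFind, if_pos hy, Option.some.injEq] at h
      subst h
      simp [hy]
    · simp only [pvFind, if_neg hy, Option.map_eq_some_iff] at h
      obtain ⟨k', hk', rfl⟩ := h
      obtain ⟨h1, h2⟩ := ih hk'
      refine ⟨?_, ?_⟩
      · intro x hx
        have hx' : x = y ∨ x ∈ ys.take k' := by simpa using hx
        rcases hx' with rfl | hx'
        · exact hy
        · exact h1 x hx'
      · simpa using h2

-- pvF skips a block of non-target characters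
theorem pvF_skip {t : Char} : ∀ (pre rest : List Char) (c : Nat), t = pvCyc c →
    (∀ x ∈ pre, x ≠ t) → pvF (pre ++ rest) c = pvF rest c := by
  intro pre
  induction pre with
  | nil => intro rest c _ _; rfl
  | cons y ys ih =>
    intro rest c ht hpre
    have hy : y ≠ pvCyc c := ht ▸ hpre y (by simp)
    simp only [List.cons_append, pvF, if_neg hy]
    exact ih rest c ht (fun x hx => hpre x (by simp [hx]))

-- B's loop computes pvF
theorem pvGoB_eq_F : ∀ (cs : List Char) (c : Nat), pvGoB cs c = pvF cs c := by
  intro cs c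
  induction cs, c using pvGoB.induct with
  | case1 cs c h =>
    rw [pvGoB, h]
    have hskip := pvF_skip cs [] c rfl (fun x hx => pvFind_none h x hx)
    simpa [pvF] using hskip.symm
  | case2 cs c k h ih =>
    rw [pvGoB, h]
    obtain ⟨h1, h2⟩ := pvFind_some h
    have hsplit : cs = cs.take k ++ (pvCyc c :: cs.drop (k + 1)) := by
      conv_lhs => rw [← List.take_append_drop k cs]
      rw [h2]
    calc pvGoB (cs.drop (k + 1)) (c + 1) = pvF (cs.drop (k + 1)) (c + 1) := ih
      _ = pvF (pvCyc c :: cs.drop (k + 1)) c := by simp [pvF]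
      _ = pvF (cs.take k ++ (pvCyc c :: cs.drop (k + 1))) c :=
          (pvF_skip _ _ c rfl h1).symm
      _ = pvF cs c := by rw [← hsplit]

-- ===== VERDICT (by name: the statement is the Claim_ definition above) =====
theorem get_the_vowels_spec : Claim_equal_get_the_vowels := by
  intro word _
  unfold Spec_get_the_vowels get_the_vowels get_the_vowels_alt
  have hA : pvGoA (word.toList.filter (fun x => "aeiou".toList.contains x)) 0 (pvRot 0)
      = pvF word.toList 0 := pvGoA_eq_F word.toList 0
  have h0 : pvRot 0 = "aeiou".toList := by decide
  rw [pvGoB_eq_F]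
  simp only [h0] at hA
  simp only [hA]
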